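-- pv_equiv track=rewrite | github.com/BigBigboss02/Causal-Inference-Under-Uncertainty | data/calculate_prob_overtrials.py | cumulative_opened_boxes
-- ===== SOURCE A (Python) =====
-- def cumulative_opened_boxes(trials):
--     """
--     For one child, compute the cumulative number of unique boxes opened
--     after each trial.
--
--     K_n = number of unique boxes successfully opened by trial n.
--
--     This trajectory is monotone non-decreasing.
--     """
--     opened_boxes = set()
--     trajectory = []
--
--     for trial in trials:
--         box_id = trial[1]
--         outcome = int(trial[2])
--
--         if outcome == 1:
--             opened_boxes.add(box_id)
--
--         trajectory.append(len(opened_boxes))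
--
--     return trajectory
-- ===== SOURCE B (Python) =====
-- def cumulative_opened_boxes(trials):
--     # Two-phase decomposition: first compute per-trial increments (1 iff the
--     # trial newly opens a box), then take a running sum over the increments.
--     seen = set()
--     increments = []
--     for trial in trials:
--         box_id = trial[1]
--         outcome = int(trial[2])
--         if outcome == 1 and box_id not in seen:
--             seen.add(box_id)
--             increments.append(1)
--         else:
--             increments.append(0)
--     trajectory = []
--     total = 0
--     for inc in increments:
--         total += inc
--         trajectory.append(total)
--     return trajectory
-- ===== Notes on version B (the rewrite author's own statement) =====
-- stated objective: alternative
-- what changed: B splits the single loop that maintains a set and appends its size into two phases: a first pass producing a 0/1 increments list (1 iff the trial newly opens a box) and a second running-sum pass over the increments; the output is never read off the set's size.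
import Mathlib
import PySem

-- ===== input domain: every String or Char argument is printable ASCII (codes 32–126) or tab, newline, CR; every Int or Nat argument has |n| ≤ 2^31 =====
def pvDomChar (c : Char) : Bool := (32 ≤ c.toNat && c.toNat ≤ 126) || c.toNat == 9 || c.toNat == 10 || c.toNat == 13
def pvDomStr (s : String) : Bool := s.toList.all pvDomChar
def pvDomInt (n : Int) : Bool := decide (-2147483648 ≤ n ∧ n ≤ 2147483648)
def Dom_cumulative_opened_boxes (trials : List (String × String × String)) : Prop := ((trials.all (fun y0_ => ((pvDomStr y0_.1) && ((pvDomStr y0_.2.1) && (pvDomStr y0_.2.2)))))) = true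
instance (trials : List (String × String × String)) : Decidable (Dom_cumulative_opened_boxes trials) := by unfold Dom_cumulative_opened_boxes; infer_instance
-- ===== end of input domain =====

-- B computes the trajectory in two phases (0/1 increments list, then a running sum) instead of
-- appending the live set's size each step; objective: alternative decomposition (same O(n) cost).


-- ===== PORT A =====
-- literal port of A: one fold keeping (opened_boxes set, trajectory), appending the set's size each trial
def pvStepA (st : PySem.Set String × List Int) (trial : String × String × String) :
    PySem.Set String × List Int :=
  let box_id := trial.2.1
  let outcome := (PySem.Int.ofStr? trial.2.2).getD 0   -- int(trial[2]); none (ValueError) excluded by Pre_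
  let opened := if outcome = 1 then PySem.Set.add st.1 box_id else st.1
  (opened, st.2 ++ [(PySem.Set.len opened : Int)])

def cumulative_opened_boxes (trials : List (String × String × String)) : List Int :=
  (trials.foldl pvStepA (PySem.Set.empty, [])).2

-- ===== PORT B =====
-- phase 1 of B: the 0/1 increments list
def pvStepB (st : PySem.Set String × List Int) (trial : String × String × String) :
    PySem.Set String × List Int :=
  let box_id := trial.2.1
  let outcome := (PySem.Int.ofStr? trial.2.2).getD 0
  if outcome = 1 ∧ PySem.Set.contains st.1 box_id = false then
    (PySem.Set.add st.1 box_id, st.2 ++ [(1 : Int)])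
  else
    (st.1, st.2 ++ [(0 : Int)])

def pvIncsB (trials : List (String × String × String)) : List Int :=
  (trials.foldl pvStepB (PySem.Set.empty, [])).2

-- phase 2 of B: running sum over the increments
def pvStepC (st : Int × List Int) (inc : Int) : Int × List Int :=
  (st.1 + inc, st.2 ++ [st.1 + inc])

def cumulative_opened_boxes_alt (trials : List (String × String × String)) : List Int :=
  ((pvIncsB trials).foldl pvStepC ((0 : Int), [])).2

-- ===== PRECONDITION & SPEC =====
-- Pre_ excludes exactly the trials whose third component is not a valid int literal, where Python's int() raises ValueError
def Pre_cumulative_opened_boxes (trials : List (String × String × String)) : Prop :=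
  trials.all (fun t => (PySem.Int.ofStr? t.2.2).isSome) = true
instance (trials : List (String × String × String)) : Decidable (Pre_cumulative_opened_boxes trials) := by unfold Pre_cumulative_opened_boxes; infer_instance
def pvWitness_cumulative_opened_boxes : (List (String × String × String)) :=
  [("c1", "box1", "1"), ("c1", "box2", "0"), ("c1", "box1", "1")]
def Spec_cumulative_opened_boxes (trials : List (String × String × String)) (out : List Int) : Prop := out = cumulative_opened_boxes_alt trials
instance (trials : List (String × String × String)) (out : List Int) : Decidable (Spec_cumulative_opened_boxes trials out) := by unfold Spec_cumulative_opened_boxes; infer_instance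

-- ===== CLAIM (what is proved, stated in full; the proofs are below) =====
def Claim_equal_cumulative_opened_boxes : Prop := ∀ (trials : List (String × String × String)), Dom_cumulative_opened_boxes trials → Pre_cumulative_opened_boxes trials → Spec_cumulative_opened_boxes trials (cumulative_opened_boxes trials)

-- ===== LEMMAS AND PROOFS =====

-- cons-form of A's trajectory from a given opened set
def pvTrajA : List (String × String × String) → PySem.Set String → List Int
  | [], _ => []
  | t :: ts, s =>
    let opened := if (PySem.Int.ofStr? t.2.2).getD 0 = 1 then PySem.Set.add s t.2.1 else s
    (PySem.Set.len opened : Int) :: pvTrajA ts opened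

-- cons-form of B's increments from a given seen set
def pvIncs : List (String × String × String) → PySem.Set String → List Int
  | [], _ => []
  | t :: ts, s =>
    if (PySem.Int.ofStr? t.2.2).getD 0 = 1 ∧ PySem.Set.contains s t.2.1 = false then
      (1 : Int) :: pvIncs ts (PySem.Set.add s t.2.1)
    else
      (0 : Int) :: pvIncs ts s

-- cons-form of the running sum
def pvScan : Int → List Int → List Int
  | _, [] => []
  | n, i :: is => (n + i) :: pvScan (n + i) is

theorem pvFoldA_eq (ts : List (String × String × String)) (st : PySem.Set String × List Int) :
    (ts.foldl pvStepA st).2 = st.2 ++ pvTrajA ts st.1 := by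
  induction ts generalizing st with
  | nil => simp [pvTrajA]
  | cons t ts ih =>
    rw [List.foldl_cons, ih]
    simp [pvStepA, pvTrajA]

theorem pvFoldB_eq (ts : List (String × String × String)) (st : PySem.Set String × List Int) :
    (ts.foldl pvStepB st).2 = st.2 ++ pvIncs ts st.1 := by
  induction ts generalizing st with
  | nil => simp [pvIncs]
  | cons t ts ih =>
    rw [List.foldl_cons, ih]
    by_cases h : (PySem.Int.ofStr? t.2.2).getD 0 = 1 ∧ PySem.Set.contains st.1 t.2.1 = false
    · simp only [pvStepB, pvIncs, if_pos h]
      simp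
    · simp only [pvStepB, pvIncs, if_neg h]
      simp

theorem pvFoldC_eq (incs : List Int) (st : Int × List Int) :
    (incs.foldl pvStepC st).2 = st.2 ++ pvScan st.1 incs := by
  induction incs generalizing st with
  | nil => simp [pvScan]
  | cons i is ih =>
    rw [List.foldl_cons, ih]
    simp [pvStepC, pvScan]

theorem pvTraj_eq_scan (ts : List (String × String × String)) (s : PySem.Set String) :
    pvTrajA ts s = pvScan (PySem.Set.len s : Int) (pvIncs ts s) := by
  induction ts generalizing s with
  | nil => simp [pvTrajA, pvIncs, pvScan]
  | cons t ts ih =>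
    by_cases ho : (PySem.Int.ofStr? t.2.2).getD 0 = 1
    · by_cases hc : PySem.Set.contains s t.2.1 = false
      · have hm : t.2.1 ∉ s := by simpa using hc
        have hadd : PySem.Set.add s t.2.1 = s ++ [t.2.1] := by
          simp [PySem.Set.add, hm]
        have hlen : (PySem.Set.len (PySem.Set.add s t.2.1) : Int) = (PySem.Set.len s : Int) + 1 := by
          simp [hadd, PySem.Set.len]
        simp only [pvTrajA, pvIncs, if_pos ho, if_pos (And.intro ho hc)]
        simp only [pvScan]
        rw [ih, hlen]
      · have hm : t.2.1 ∈ s := by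
          by_contra hm
          exact hc (by simpa using hm)
        have hadd : PySem.Set.add s t.2.1 = s := by
          simp [PySem.Set.add, hm]
        have hcond : ¬((PySem.Int.ofStr? t.2.2).getD 0 = 1 ∧ PySem.Set.contains s t.2.1 = false) := by
          intro h; exact hc h.2
        simp only [pvTrajA, pvIncs, if_pos ho, if_neg hcond]
        simp only [pvScan]
        rw [hadd, ih]
        simp
    · have hcond : ¬((PySem.Int.ofStr? t.2.2).getD 0 = 1 ∧ PySem.Set.contains s t.2.1 = false) := by
        intro h; exact ho h.1
      simp only [pvTrajA, pvIncs, if_neg ho, if_neg hcond]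
      simp only [pvScan]
      rw [ih]
      simp

-- ===== VERDICT (by name: the statement is the Claim_ definition above) =====
theorem cumulative_opened_boxes_spec : Claim_equal_cumulative_opened_boxes := by
  intro trials _ _
  unfold Spec_cumulative_opened_boxes cumulative_opened_boxes cumulative_opened_boxes_alt pvIncsB
  rw [pvFoldA_eq, pvFoldB_eq, pvFoldC_eq]
  have h := pvTraj_eq_scan trials PySem.Set.empty
  simpa [PySem.Set.empty, PySem.Set.len] using h
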